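-- pv_equiv track=rewrite | github.com/rbondoc96/Python-Practice | ATBS/ch6-strings/piglatin.py | eng_to_piglatin
-- ===== SOURCE A (Python) =====
-- def eng_to_piglatin(word):
--     VOWELS = ("a", "e", "i", "o", "u", "y")
--
--     prefix_non_letters = ""
--     # Separate non-letters at the start of the word
--     while len(word) > 0 and not word[0].isalpha():
--         prefix_non_letters += word[0]
--         word = word[1:]
--     if len(word) == 0:
--         return prefix_non_letters
--
--     # Separate non-letters at the end of the word
--     suffix_non_letters = ""
--     while not word[-1].isalpha():
--         suffix_non_letters += word[-1]
--         word = word[:-1]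
--
--     was_upper = word.isupper()
--     was_title = word.istitle()
--
--     word = word.lower()
--
--     # Separate prefixed consonants
--     prefix_cons = ""
--     while len(word) > 0 and not word[0] in VOWELS:
--         prefix_cons += word[0]
--         word = word[1:]
--
--     if prefix_cons != "":
--         ret = word + prefix_cons + "ay"
--     else:
--         ret = word + "yay"
--
--     if was_upper:
--         return ret.upper()
--     elif was_title:
--         return ret.title()
--
--     return ret
-- ===== SOURCE B (Python) =====
-- def eng_to_piglatin(word):
--     VOWELS = "aeiouy"
--     # boundary indices of the alphabetic core (single structural parse, no string rebuilding)
--     i = next((p for p, c in enumerate(word) if c.isalpha()), None)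
--     if i is None:
--         return word
--     j = len(word) - 1 - next(p for p, c in enumerate(reversed(word)) if c.isalpha())
--     core = word[i:j + 1]
--     was_upper = core.isupper()
--     was_title = core.istitle()
--     low = core.lower()
--     k = next((p for p, c in enumerate(low) if c in VOWELS), len(low))
--     ret = low[k:] + low[:k] + "ay" if k else low + "yay"
--     if was_upper:
--         return ret.upper()
--     if was_title:
--         return ret.title()
--     return ret
-- ===== Notes on version B (the rewrite author's own statement) =====
-- stated objective: faster
-- what changed: Replaces A's four incremental slice-and-rebuild while-loops with a single structural parse: find the first/last alphabetic indices, slice out the core once, find the first vowel index, and assemble the result by slicing.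
import Mathlib
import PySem

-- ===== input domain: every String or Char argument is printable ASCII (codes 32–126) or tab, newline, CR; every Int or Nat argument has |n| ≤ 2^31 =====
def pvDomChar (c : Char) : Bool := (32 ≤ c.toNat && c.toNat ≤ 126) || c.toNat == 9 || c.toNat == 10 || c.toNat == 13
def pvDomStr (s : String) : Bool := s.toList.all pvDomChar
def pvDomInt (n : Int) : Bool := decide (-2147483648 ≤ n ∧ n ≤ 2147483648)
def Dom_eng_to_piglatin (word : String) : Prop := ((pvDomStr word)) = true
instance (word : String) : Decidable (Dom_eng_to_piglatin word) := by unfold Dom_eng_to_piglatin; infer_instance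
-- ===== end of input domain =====

-- B replaces A's four incremental slice-and-rebuild while-loops by a single structural parse
-- (first/last alphabetic index, one core slice, first vowel index); objective: faster (O(n) vs A's
-- repeated string copying).

-- Shared hand-ports of Python str builtins both versions call (exact on the ASCII domain):
-- `c in VOWELS`
def pvIsVowel (c : Char) : Bool := c ∈ ['a', 'e', 'i', 'o', 'u', 'y']

-- str.isupper(): at least one cased (ASCII: alphabetic) char and no lowercase char
def pvIsUpperStr (l : List Char) : Bool :=
  l.any PySem.Chars.isalpha && l.all (fun c => !PySem.Chars.islower c)

-- str.istitle(): uppercase only after uncased, lowercase only after cased, ≥ 1 cased (ASCII-exact)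
def pvIsTitle (prevCased found : Bool) : List Char → Bool
  | [] => found
  | c :: rest =>
    if PySem.Chars.isupper c then !prevCased && pvIsTitle true true rest
    else if PySem.Chars.islower c then prevCased && pvIsTitle true true rest
    else pvIsTitle false found rest

-- str.title(): a letter is uppercased after a non-letter, lowercased after a letter (ASCII-exact)
def pvTitle (prevCased : Bool) : List Char → List Char
  | [] => []
  | c :: rest =>
    if PySem.Chars.isalpha c then
      (if prevCased then PySem.Chars.lowerChar c else PySem.Chars.upperChar c) :: pvTitle true rest
    else c :: pvTitle false rest

-- ===== PORT A =====
-- the `while … word[0].isalpha()` loop accumulating prefix_non_letters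
def pvAPrefix (acc : List Char) : List Char → List Char × List Char
  | [] => (acc, [])
  | c :: rest =>
    if PySem.Chars.isalpha c then (acc, c :: rest) else pvAPrefix (acc ++ [c]) rest

-- the `while not word[-1].isalpha()` loop (word is never empty here in A, so the [] case is inert)
def pvASuffix (suf : List Char) (w : List Char) : List Char × List Char :=
  match h : w.getLast? with
  | none => (suf, w)
  | some c =>
    if PySem.Chars.isalpha c then (suf, w) else pvASuffix (suf ++ [c]) w.dropLast
termination_by w.length
decreasing_by
  have hw : w ≠ [] := by intro hnil; simp [hnil] at h
  simpa using Nat.pred_lt (by simpa using List.length_pos_iff.mpr hw |>.ne')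

-- the `while … not word[0] in VOWELS` loop accumulating prefix_cons
def pvACons (acc : List Char) : List Char → List Char × List Char
  | [] => (acc, [])
  | c :: rest =>
    if pvIsVowel c then (acc, c :: rest) else pvACons (acc ++ [c]) rest

def eng_to_piglatin (word : String) : String :=
  let p := pvAPrefix [] word.toList
  if p.2 = [] then String.ofList p.1
  else
    let s := pvASuffix [] p.2
    let w2 := s.2
    let wasU := pvIsUpperStr w2
    let wasT := pvIsTitle false false w2
    let low := PySem.Chars.lower w2
    let q := pvACons [] low
    let ret := if q.1 ≠ [] then q.2 ++ q.1 ++ ['a', 'y'] else q.2 ++ ['y', 'a', 'y']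
    if wasU then String.ofList (PySem.Chars.upper ret)
    else if wasT then String.ofList (pvTitle false ret)
    else String.ofList ret

-- ===== PORT B =====
def eng_to_piglatin_alt (word : String) : String :=
  let l := word.toList
  match l.findIdx? PySem.Chars.isalpha with
  | none => word
  | some i =>
    let jr := l.reverse.findIdx PySem.Chars.isalpha
    let j := l.length - 1 - jr
    let core := (l.drop i).take (j + 1 - i)
    let wasU := pvIsUpperStr core
    let wasT := pvIsTitle false false core
    let low := PySem.Chars.lower core
    let k := low.findIdx pvIsVowel
    let ret := if k ≠ 0 then low.drop k ++ low.take k ++ ['a', 'y'] else low ++ ['y', 'a', 'y']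
    if wasU then String.ofList (PySem.Chars.upper ret)
    else if wasT then String.ofList (pvTitle false ret)
    else String.ofList ret

-- ===== PRECONDITION & SPEC =====
def Spec_eng_to_piglatin (word : String) (out : String) : Prop := out = eng_to_piglatin_alt word
instance (word : String) (out : String) : Decidable (Spec_eng_to_piglatin word out) := by unfold Spec_eng_to_piglatin; infer_instance

-- ===== CLAIM (what is proved, stated in full; the proofs are below) =====
def Claim_equal_eng_to_piglatin : Prop := ∀ (word : String), Dom_eng_to_piglatin word → Spec_eng_to_piglatin word (eng_to_piglatin word)

-- ===== LEMMAS AND PROOFS =====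

theorem pvAPrefix_eq (l acc : List Char) :
    pvAPrefix acc l = (acc ++ l.takeWhile (fun c => !PySem.Chars.isalpha c),
      l.dropWhile (fun c => !PySem.Chars.isalpha c)) := by
  induction l generalizing acc with
  | nil => simp [pvAPrefix]
  | cons c rest ih =>
    by_cases h : PySem.Chars.isalpha c <;> simp [pvAPrefix, h, ih]

theorem pvACons_eq (l acc : List Char) :
    pvACons acc l = (acc ++ l.takeWhile (fun c => !pvIsVowel c),
      l.dropWhile (fun c => !pvIsVowel c)) := by
  induction l generalizing acc with
  | nil => simp [pvACons]
  | cons c rest ih =>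
    by_cases h : pvIsVowel c <;> simp [pvACons, h, ih]

theorem pvASuffix_eq (w suf : List Char) :
    pvASuffix suf w = (suf ++ w.reverse.takeWhile (fun c => !PySem.Chars.isalpha c),
      (w.reverse.dropWhile (fun c => !PySem.Chars.isalpha c)).reverse) := by
  induction w using List.reverseRecOn generalizing suf with
  | nil => simp [pvASuffix]
  | append_singleton l a ih =>
    rw [pvASuffix]
    have hgl : (l ++ [a]).getLast? = some a := List.getLast?_concat
    split
    · next heq => rw [hgl] at heq; cases heq
    · next c heq =>
      rw [hgl] at heq
      cases heq
      by_cases h : PySem.Chars.isalpha a <;>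
        simp [h, ih, List.dropLast_concat]

theorem findIdx_eq_len_takeWhile {α : Type} (p : α → Bool) (l : List α) :
    l.findIdx p = (l.takeWhile (fun c => !p c)).length := by
  induction l with
  | nil => simp
  | cons c rest ih =>
    by_cases h : p c <;> simp [List.findIdx_cons, h, ih]

theorem findIdx?_some_len {α : Type} {p : α → Bool} {l : List α} {i : Nat}
    (h : l.findIdx? p = some i) : i = (l.takeWhile (fun c => !p c)).length := by
  induction l generalizing i with
  | nil => simp at h
  | cons c rest ih =>
    by_cases hc : p c
    · simp [List.findIdx?_cons, hc] at h; simp [← h, hc]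
    · simp [List.findIdx?_cons, hc] at h
      obtain ⟨j, hj, rfl⟩ := h
      simp [hc, ih hj]

theorem takeWhile_append_left {α : Type} (p : α → Bool) (xs ys : List α) :
    xs.dropWhile p ≠ [] → (xs ++ ys).takeWhile p = xs.takeWhile p := by
  induction xs with
  | nil => simp
  | cons c rest ih =>
    intro h
    by_cases hc : p c
    · have h' : rest.dropWhile p ≠ [] := by simpa [List.dropWhile_cons, hc] using h
      simp [List.takeWhile_cons, hc, ih h']
    · simp [List.takeWhile_cons, hc]

-- the stripped core computed by A's suffix loop equals B's one-shot slice
theorem core_eq (l : List Char) (i : Nat)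
    (hfi : l.findIdx? PySem.Chars.isalpha = some i) :
    (pvASuffix [] (l.dropWhile (fun c => !PySem.Chars.isalpha c))).2
      = (l.drop i).take (l.length - 1 - l.reverse.findIdx PySem.Chars.isalpha + 1 - i) := by
  have hi : i = (l.takeWhile (fun c => !PySem.Chars.isalpha c)).length := findIdx?_some_len hfi
  set na : Char → Bool := fun c => !PySem.Chars.isalpha c with hna
  set tw := l.takeWhile na with htw
  set r := l.dropWhile na with hr
  have hsplit : l = tw ++ r := (List.takeWhile_append_dropWhile).symm
  have hrne : r ≠ [] := by
    intro h0
    have hall : ∀ x ∈ l, na x = true := List.dropWhile_eq_nil_iff.mp h0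
    have : l.findIdx? PySem.Chars.isalpha = none := List.findIdx?_eq_none_iff.mpr (by
      intro x hx; have := hall x hx; simp [hna] at this; simp [this])
    simp [this] at hfi
  have hhead : PySem.Chars.isalpha (r.head hrne) = true := by
    have h2 := List.head_dropWhile_not na (l := l) hrne
    simp only [hna, Bool.not_eq_false'] at h2
    exact h2
  have hmem : (r.head hrne) ∈ r.reverse := by
    exact List.mem_reverse.mpr (List.head_mem hrne)
  have hdwRne : r.reverse.dropWhile na ≠ [] := by
    intro h0
    have := List.dropWhile_eq_nil_iff.mp h0 _ hmem
    simp [hna, hhead] at this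
  set twR := r.reverse.takeWhile na with htwR
  set dwR := r.reverse.dropWhile na with hdwR
  have hsplitR : r.reverse = twR ++ dwR := (List.takeWhile_append_dropWhile).symm
  -- jr computed on the whole reversed word = jr computed on the reversed core run
  have hjr : l.reverse.findIdx PySem.Chars.isalpha = twR.length := by
    rw [findIdx_eq_len_takeWhile]
    have : l.reverse = r.reverse ++ tw.reverse := by rw [hsplit, List.reverse_append]
    rw [this, ← hna, takeWhile_append_left na _ _ hdwRne, htwR]
  have hdrop : l.drop i = r := by
    rw [hsplit, hi]; exact List.drop_left
  have hlen : l.length = tw.length + r.length := by rw [hsplit]; simp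
  have hlenR : r.length = twR.length + dwR.length := by
    have : r.reverse.length = twR.length + dwR.length := by rw [hsplitR]; simp
    simpa using this
  have hdwpos : 0 < dwR.length := List.length_pos_iff.mpr hdwRne
  have harith : l.length - 1 - l.reverse.findIdx PySem.Chars.isalpha + 1 - i = dwR.length := by
    rw [hjr, hi]; omega
  have hrrev : r = dwR.reverse ++ twR.reverse := by
    have := congrArg List.reverse hsplitR
    simpa [List.reverse_append] using this
  rw [pvASuffix_eq, harith, hdrop]
  simp only [← hna, ← hr, ← hdwR]
  conv_rhs => rw [hrrev]
  exact (List.take_left' (by simp)).symm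

-- A's consonant loop + assembly equals B's vowel-index slicing
theorem drop_len_takeWhile {α : Type} (p : α → Bool) (l : List α) :
    l.drop (l.takeWhile p).length = l.dropWhile p := by
  induction l with
  | nil => simp
  | cons c rest ih => by_cases hc : p c <;> simp [List.takeWhile_cons, List.dropWhile_cons, hc, ih]

theorem take_len_takeWhile {α : Type} (p : α → Bool) (l : List α) :
    l.take (l.takeWhile p).length = l.takeWhile p := by
  induction l with
  | nil => simp
  | cons c rest ih => by_cases hc : p c <;> simp [List.takeWhile_cons, hc, ih]

-- A's consonant loop + assembly equals B's vowel-index slicing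
theorem ret_eq (low : List Char) :
    (if (pvACons [] low).1 ≠ [] then (pvACons [] low).2 ++ (pvACons [] low).1 ++ ['a', 'y']
      else (pvACons [] low).2 ++ ['y', 'a', 'y'])
    = (if low.findIdx pvIsVowel ≠ 0 then
        low.drop (low.findIdx pvIsVowel) ++ low.take (low.findIdx pvIsVowel) ++ ['a', 'y']
      else low ++ ['y', 'a', 'y']) := by
  have hk : low.findIdx pvIsVowel = (low.takeWhile (fun c => !pvIsVowel c)).length :=
    findIdx_eq_len_takeWhile pvIsVowel low
  rw [pvACons_eq, hk]
  by_cases h : low.takeWhile (fun c => !pvIsVowel c) = []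
  · have hdw : low.dropWhile (fun c => !pvIsVowel c) = low := by
      have h2 := drop_len_takeWhile (fun c => !pvIsVowel c) low
      rw [h] at h2; simpa using h2.symm
    simp [h, hdw]
  · have hlen : (low.takeWhile (fun c => !pvIsVowel c)).length ≠ 0 := by
      simpa [List.length_eq_zero_iff] using h
    simp [h, hlen, drop_len_takeWhile, take_len_takeWhile]

-- ===== VERDICT (by name: the statement is the Claim_ definition above) =====
theorem eng_to_piglatin_spec : Claim_equal_eng_to_piglatin := by
  unfold Claim_equal_eng_to_piglatin Spec_eng_to_piglatin
  intro word _
  unfold eng_to_piglatin eng_to_piglatin_alt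
  match hfi : word.toList.findIdx? PySem.Chars.isalpha with
  | none =>
    have hall : ∀ x ∈ word.toList, PySem.Chars.isalpha x = false := List.findIdx?_eq_none_iff.mp hfi
    have htw : word.toList.takeWhile (fun c => !PySem.Chars.isalpha c) = word.toList :=
      List.takeWhile_eq_self_iff.mpr (by intro x hx; simp [hall x hx])
    have hdw : word.toList.dropWhile (fun c => !PySem.Chars.isalpha c) = [] :=
      List.dropWhile_eq_nil_iff.mpr (by intro x hx; simp [hall x hx])
    simp only [hfi, pvAPrefix_eq, hdw, htw, List.nil_append]
    simp [String.ofList_toList]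
  | some i =>
    have hdwne : word.toList.dropWhile (fun c => !PySem.Chars.isalpha c) ≠ [] := by
      intro h0
      have hall : ∀ x ∈ word.toList, (!PySem.Chars.isalpha x) = true := List.dropWhile_eq_nil_iff.mp h0
      have : word.toList.findIdx? PySem.Chars.isalpha = none := List.findIdx?_eq_none_iff.mpr (by
        intro x hx; simpa using hall x hx)
      simp [this] at hfi
    simp only [hfi, pvAPrefix_eq, List.nil_append, if_neg hdwne]
    rw [core_eq _ _ hfi]
    rw [ret_eq]
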